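-- pv_equiv track=rewrite | github.com/changkun/life-simulator | life/modes/graph_ca.py | _build_grid2d
-- ===== SOURCE A (Python) =====
-- import math
--
-- def _build_grid2d(n):
--     """2D grid graph (closest square)."""
--     side = max(2, int(math.sqrt(n)))
--     actual_n = side * side
--     adj = {i: [] for i in range(actual_n)}
--     for r in range(side):
--         for c in range(side):
--             idx = r * side + c
--             if c + 1 < side:
--                 nb = r * side + (c + 1)
--                 adj[idx].append(nb)
--                 adj[nb].append(idx)
--             if r + 1 < side:
--                 nb = (r + 1) * side + c
--                 adj[idx].append(nb)
--                 adj[nb].append(idx)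
--     return actual_n, adj
-- ===== SOURCE B (Python) =====
-- import math
--
-- def _build_grid2d(n):
--     """2D grid graph (closest square): node-centric neighbor construction."""
--     side = max(2, int(math.sqrt(n)))
--     actual_n = side * side
--     adj = {}
--     for idx in range(actual_n):
--         r, c = divmod(idx, side)
--         nbrs = []
--         if r > 0:
--             nbrs.append(idx - side)
--         if c > 0:
--             nbrs.append(idx - 1)
--         if c + 1 < side:
--             nbrs.append(idx + 1)
--         if r + 1 < side:
--             nbrs.append(idx + side)
--         adj[idx] = nbrs
--     return actual_n, adj
-- ===== Notes on version B (the rewrite author's own statement) =====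
-- stated objective: simpler
-- what changed: Replaces the edge-centric nested row/column loop that appends each edge's endpoints into two adjacency lists with a single node-centric pass that computes (r, c) = divmod(idx, side) and emits each node's full neighbor list (up, left, right, down) at once.
import Mathlib
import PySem

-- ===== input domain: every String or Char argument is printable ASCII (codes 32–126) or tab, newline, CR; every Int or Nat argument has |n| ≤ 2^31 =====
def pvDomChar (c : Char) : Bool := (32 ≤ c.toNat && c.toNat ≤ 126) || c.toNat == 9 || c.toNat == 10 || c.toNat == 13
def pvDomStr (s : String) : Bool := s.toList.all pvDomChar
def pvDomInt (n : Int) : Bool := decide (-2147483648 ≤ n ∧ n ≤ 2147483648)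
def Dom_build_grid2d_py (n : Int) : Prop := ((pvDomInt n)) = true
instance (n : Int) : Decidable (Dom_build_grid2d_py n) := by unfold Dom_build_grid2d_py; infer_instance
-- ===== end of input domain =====

-- B builds each node's neighbor list directly in one node-centric pass (divmod) instead of
-- A's edge-centric nested loop double-appending per edge; objective: simpler.


-- ===== PORT A =====
-- int(math.sqrt(n)) ported by hand as exact floor square root (binary search, fuel 64 ≥ log2 bound):
-- exact on the admitted domain 0 ≤ n ≤ 2^31, where the float math.sqrt rounds correctly.
def pvISqrtGo : Nat → Nat → Nat → Nat → Nat
  | 0, _, lo, _ => lo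
  | f+1, n, lo, hi =>
    let mid := (lo + hi) / 2
    if mid = lo then lo
    else if mid * mid ≤ n then pvISqrtGo f n mid hi else pvISqrtGo f n lo mid
def pvISqrt (n : Int) : Int := (pvISqrtGo 64 n.toNat 0 (n.toNat + 1) : Nat)

-- adj[k].append(v) is Dict.modify k [] (· ++ [v]) — the key is always present in A's loop.
def build_grid2d_py (n : Int) : Int × (List (Int × List Int)) :=
  let side : Int := max 2 (pvISqrt n)
  let actual_n := side * side
  let adj : PySem.Dict Int (List Int) :=
    (PySem.List.pyRange 0 actual_n 1).foldl (fun d i => d.insert i []) PySem.Dict.empty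
  let adj :=
    (PySem.List.pyRange 0 side 1).foldl (fun adj r =>
      (PySem.List.pyRange 0 side 1).foldl (fun adj c =>
        let idx := r * side + c
        let adj := if c + 1 < side then
            let nb := r * side + (c + 1)
            let adj := adj.modify idx [] (· ++ [nb])
            adj.modify nb [] (· ++ [idx])
          else adj
        let adj := if r + 1 < side then
            let nb := (r + 1) * side + c
            let adj := adj.modify idx [] (· ++ [nb])
            adj.modify nb [] (· ++ [idx])
          else adj
        adj) adj) adj
  (actual_n, adj.items)

-- ===== PORT B =====
def build_grid2d_py_alt (n : Int) : Int × (List (Int × List Int)) :=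
  let side : Int := max 2 (pvISqrt n)
  let actual_n := side * side
  let adj : PySem.Dict Int (List Int) :=
    (PySem.List.pyRange 0 actual_n 1).foldl (fun d idx =>
      let r := PySem.Int.floordiv idx side
      let c := PySem.Int.mod idx side
      let nbrs : List Int :=
        (if r > 0 then [idx - side] else []) ++
        (if c > 0 then [idx - 1] else []) ++
        (if c + 1 < side then [idx + 1] else []) ++
        (if r + 1 < side then [idx + side] else [])
      d.insert idx nbrs) PySem.Dict.empty
  (actual_n, adj.items)

-- ===== PRECONDITION & SPEC =====
-- Pre_ excludes only negative n, on which math.sqrt raises ValueError (in A and in B alike).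
def Pre_build_grid2d_py (n : Int) : Prop := 0 ≤ n
instance (n : Int) : Decidable (Pre_build_grid2d_py n) := by unfold Pre_build_grid2d_py; infer_instance
def pvWitness_build_grid2d_py : Int := (10)

def Spec_build_grid2d_py (n : Int) (out : Int × (List (Int × List Int))) : Prop := out = build_grid2d_py_alt n
instance (n : Int) (out : Int × (List (Int × List Int))) : Decidable (Spec_build_grid2d_py n out) := by unfold Spec_build_grid2d_py; infer_instance

-- ===== CLAIM (what is proved, stated in full; the proofs are below) =====
def Claim_equal_build_grid2d_py : Prop := ∀ (n : Int), Dom_build_grid2d_py n → Pre_build_grid2d_py n → Spec_build_grid2d_py n (build_grid2d_py n)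

-- ===== LEMMAS AND PROOFS =====

-- The stream of (key, appended value) operations A's step (r, c) performs, in order.
def pvStep (s r c : Int) : List (Int × Int) :=
  (if c + 1 < s then [(r*s+c, r*s+(c+1)), (r*s+(c+1), r*s+c)] else []) ++
  (if r + 1 < s then [(r*s+c, (r+1)*s+c), ((r+1)*s+c, r*s+c)] else [])

-- All operations of A's double loop, in execution order.
def pvOps (s : Int) : List (Int × Int) :=
  (PySem.List.pyRange 0 s 1).flatMap (fun r =>
    (PySem.List.pyRange 0 s 1).flatMap (fun c => pvStep s r c))

-- A's nested loop is exactly the fold of pvOps.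
lemma pvLoop_eq_foldl_ops (s : Int) (d : PySem.Dict Int (List Int)) :
    (PySem.List.pyRange 0 s 1).foldl (fun adj r =>
      (PySem.List.pyRange 0 s 1).foldl (fun adj c =>
        let idx := r * s + c
        let adj := if c + 1 < s then
            let nb := r * s + (c + 1)
            let adj := adj.modify idx [] (· ++ [nb])
            adj.modify nb [] (· ++ [idx])
          else adj
        let adj := if r + 1 < s then
            let nb := (r + 1) * s + c
            let adj := adj.modify idx [] (· ++ [nb])
            adj.modify nb [] (· ++ [idx])
          else adj
        adj) adj) d
    = (pvOps s).foldl (fun d p => d.modify p.1 [] (· ++ [p.2])) d := by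
  rw [pvOps, List.foldl_flatMap]
  apply PySem.List.foldl_congr_mem
  intro acc r _
  rw [List.foldl_flatMap]
  apply PySem.List.foldl_congr_mem
  intro acc' c _
  simp only [pvStep, List.foldl_append]
  split_ifs <;> rfl

-- Looking up any key after the all-[] initialization gives [].
lemma pvGetD_init (l : List Int) (d : PySem.Dict Int (List Int)) (k : Int)
    (h : d.getD k [] = []) :
    ((l.foldl (fun d i => d.insert i ([] : List Int)) d).getD k []) = [] := by
  induction l generalizing d with
  | nil => exact h
  | cons x xs ih =>
    simp only [List.foldl_cons]
    exact ih _ (by rw [PySem.Dict.getD_insert]; split_ifs <;> simp [h])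

-- Updating a set with elements it already contains changes nothing.
lemma pvSetUpdate_subset (s : PySem.Set Int) (xs : List Int) (h : ∀ x ∈ xs, x ∈ s) :
    PySem.Set.update s xs = s := by
  induction xs generalizing s with
  | nil => rfl
  | cons x xs ih =>
    have : PySem.Set.update s (x :: xs) = PySem.Set.update (s.add x) xs := rfl
    rw [this, PySem.Set.add_of_mem (h x (by simp))]
    exact ih s (fun y hy => h y (by simp [hy]))

-- Grid decomposition is unique: r'*s + c' = r*s + c with both columns in [0, s) forces r' = r, c' = c.
lemma pvRowEq (s r c r' c' : Int) (hs : 0 < s) (h0c : 0 ≤ c) (hc : c < s)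
    (h0c' : 0 ≤ c') (hc' : c' < s) (h : r'*s + c' = r*s + c) : r' = r ∧ c' = c := by
  have e1 : PySem.Int.floordiv (r'*s + c') s = r' := by
    rw [PySem.Int.floordiv_eq_iff_of_pos hs]
    refine ⟨by linarith, ?_⟩
    have : (r' + 1) * s = r' * s + s := by ring
    linarith
  have e2 : PySem.Int.floordiv (r*s + c) s = r := by
    rw [PySem.Int.floordiv_eq_iff_of_pos hs]
    refine ⟨by linarith, ?_⟩
    have : (r + 1) * s = r * s + s := by ring
    linarith
  have hr : r' = r := by rw [← e1, ← e2, h]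
  subst hr
  exact ⟨rfl, by linarith⟩

-- The keys pvStep s r' c' touches.
lemma pvStep_key_cases (s r' c' : Int) (q : Int × Int) (h : q ∈ pvStep s r' c') :
    q.1 = r'*s+c' ∨ (c' + 1 < s ∧ q.1 = r'*s+(c'+1)) ∨ (r' + 1 < s ∧ q.1 = (r'+1)*s+c') := by
  unfold pvStep at h
  by_cases h1 : c' + 1 < s <;> by_cases h2 : r' + 1 < s
  · rw [if_pos h1, if_pos h2] at h
    simp only [List.mem_append, List.mem_cons, List.not_mem_nil, or_false] at h
    rcases h with (rfl | rfl) | (rfl | rfl)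
    · exact Or.inl rfl
    · exact Or.inr (Or.inl ⟨h1, rfl⟩)
    · exact Or.inl rfl
    · exact Or.inr (Or.inr ⟨h2, rfl⟩)
  · rw [if_pos h1, if_neg h2] at h
    simp only [List.append_nil, List.mem_cons, List.not_mem_nil, or_false] at h
    rcases h with rfl | rfl
    · exact Or.inl rfl
    · exact Or.inr (Or.inl ⟨h1, rfl⟩)
  · rw [if_neg h1, if_pos h2] at h
    simp only [List.nil_append, List.mem_cons, List.not_mem_nil, or_false] at h
    rcases h with rfl | rfl
    · exact Or.inl rfl
    · exact Or.inr (Or.inr ⟨h2, rfl⟩)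
  · rw [if_neg h1, if_neg h2] at h
    simp at h

-- A step at (r', c') whose three possible keys all differ from r*s+c filters to nothing.
lemma pvStepFilterNil (s r c r' c' : Int) (hs : 0 < s) (h0c : 0 ≤ c) (hcs : c < s)
    (h0c' : 0 ≤ c') (hcs' : c' < s)
    (hne1 : r' ≠ r ∨ c' ≠ c) (hne2 : r' ≠ r ∨ c' + 1 ≠ c) (hne3 : r' + 1 ≠ r ∨ c' ≠ c) :
    (pvStep s r' c').filter (fun q => q.1 == r*s+c) = [] := by
  rw [List.filter_eq_nil_iff]
  intro q hq
  simp only [beq_iff_eq]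
  rcases pvStep_key_cases s r' c' q hq with h | ⟨hlt, h⟩ | ⟨hlt, h⟩ <;> rw [h] <;> intro heq
  · rcases pvRowEq s r c r' c' hs h0c hcs h0c' hcs' heq with ⟨e1, e2⟩
    rcases hne1 with h' | h' <;> exact h' (by omega)
  · rcases pvRowEq s r c r' (c'+1) hs h0c hcs (by omega) hlt heq with ⟨e1, e2⟩
    rcases hne2 with h' | h' <;> exact h' (by omega)
  · rcases pvRowEq s r c (r'+1) c' hs h0c hcs h0c' hcs' heq with ⟨e1, e2⟩
    rcases hne3 with h' | h' <;> exact h' (by omega)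

-- flatMap over an integer range whose generator vanishes except possibly at j1 < j2.
lemma pvFlatMapTwo {α : Type} (a b j1 j2 : Int) (g : Int → List α) (hj : j1 < j2)
    (hz : ∀ x, a ≤ x → x < b → x ≠ j1 → x ≠ j2 → g x = []) :
    (PySem.List.pyRange a b 1).flatMap g =
      (if a ≤ j1 ∧ j1 < b then g j1 else []) ++ (if a ≤ j2 ∧ j2 < b then g j2 else []) := by
  induction hn : (b - a).toNat generalizing a with
  | zero =>
    have hba : b ≤ a := by omega
    rw [PySem.List.pyRange_one_eq_nil hba, if_neg (by omega), if_neg (by omega)]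
    rfl
  | succ m ih =>
    have hab : a < b := by omega
    rw [PySem.List.pyRange_one_cons hab, List.flatMap_cons,
      ih (a+1) (fun x hx1 hx2 => hz x (by omega) hx2) (by omega)]
    by_cases h1 : a = j1
    · subst h1
      rw [if_neg (show ¬(a + 1 ≤ a ∧ a < b) by omega),
        if_pos (show a ≤ a ∧ a < b from ⟨le_refl a, hab⟩)]
      have e2 : (a + 1 ≤ j2 ∧ j2 < b) = (a ≤ j2 ∧ j2 < b) := by
        apply propext; constructor <;> intro h <;> exact ⟨by omega, h.2⟩
      simp only [e2]; simp
    · by_cases h2 : a = j2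
      · subst h2
        rw [if_neg (show ¬(a + 1 ≤ j1 ∧ j1 < b) by omega),
          if_neg (show ¬(a + 1 ≤ a ∧ a < b) by omega),
          if_neg (show ¬(a ≤ j1 ∧ j1 < b) by omega),
          if_pos (show a ≤ a ∧ a < b from ⟨le_refl a, hab⟩)]
        simp
      · rw [hz a (le_refl a) hab h1 h2]
        have e1 : (a ≤ j1 ∧ j1 < b) = (a + 1 ≤ j1 ∧ j1 < b) := by
          apply propext; constructor <;> intro h <;> exact ⟨by omega, h.2⟩
        have e2 : (a ≤ j2 ∧ j2 < b) = (a + 1 ≤ j2 ∧ j2 < b) := by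
          apply propext; constructor <;> intro h <;> exact ⟨by omega, h.2⟩
        simp only [e1, e2]; simp

-- Hot step (r, c) itself: contributes right then down.
lemma pvHotSelf (s r c : Int) (hs : 2 ≤ s) (_h0c : 0 ≤ c) (_hcs : c < s) :
    ((pvStep s r c).filter (fun q => q.1 == r*s+c)).map (·.2) =
      (if c + 1 < s then [r*s+(c+1)] else []) ++ (if r + 1 < s then [(r+1)*s+c] else []) := by
  have e1 : ((r*s+(c+1) : Int) == r*s+c) = false := by
    rw [beq_eq_false_iff_ne]; intro h; linarith
  have e2 : (((r+1)*s+c : Int) == r*s+c) = false := by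
    rw [beq_eq_false_iff_ne]; intro h; nlinarith
  unfold pvStep
  split_ifs <;> simp [e1, e2]

-- Hot step (r, c-1): contributes the left neighbor.
lemma pvHotLeft (s r c : Int) (hs : 2 ≤ s) (_h0c : 0 < c) (hcs : c < s) :
    ((pvStep s r (c-1)).filter (fun q => q.1 == r*s+c)).map (·.2) = [r*s+(c-1)] := by
  have e1 : ((r*s+(c-1) : Int) == r*s+c) = false := by
    rw [beq_eq_false_iff_ne]; intro h; linarith
  have e3 : (((r+1)*s+(c-1) : Int) == r*s+c) = false := by
    rw [beq_eq_false_iff_ne]; intro h; nlinarith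
  unfold pvStep
  rw [if_pos (show c - 1 + 1 < s by omega)]
  split_ifs <;> simp [e1, e3]

-- Hot step (r-1, c): contributes the up neighbor.
lemma pvHotUp (s r c : Int) (hs : 2 ≤ s) (_h0r : 0 < r) (hrs : r < s) (_h0c : 0 ≤ c) (_hcs : c < s) :
    ((pvStep s (r-1) c).filter (fun q => q.1 == r*s+c)).map (·.2) = [(r-1)*s+c] := by
  have e1 : (((r-1)*s+c : Int) == r*s+c) = false := by
    rw [beq_eq_false_iff_ne]; intro h; nlinarith
  have e2 : (((r-1)*s+(c+1) : Int) == r*s+c) = false := by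
    rw [beq_eq_false_iff_ne]; intro h; nlinarith
  unfold pvStep
  rw [if_pos (show r - 1 + 1 < s by omega)]
  split_ifs <;> simp [e1, e2]

-- A non-adjacent row contributes nothing to node (r, c).
lemma pvRowZero (s r c x : Int) (hs : 2 ≤ s) (h0c : 0 ≤ c) (hcs : c < s)
    (hx1 : x ≠ r - 1) (hx2 : x ≠ r) :
    (PySem.List.pyRange 0 s 1).flatMap
      (fun c' => ((pvStep s x c').filter (fun q => q.1 == r*s+c)).map (·.2)) = [] := by
  rw [List.flatMap_eq_nil_iff]
  intro c' hc'
  rw [PySem.List.mem_pyRange_one] at hc'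
  rw [pvStepFilterNil s r c x c' (by omega) h0c hcs hc'.1 hc'.2
    (Or.inl hx2) (Or.inl hx2) (Or.inl (by omega))]
  rfl

-- Row r-1 contributes exactly the up neighbor.
lemma pvRowUp (s r c : Int) (hs : 2 ≤ s) (h0r : 0 < r) (hrs : r < s) (h0c : 0 ≤ c) (hcs : c < s) :
    (PySem.List.pyRange 0 s 1).flatMap
      (fun c' => ((pvStep s (r-1) c').filter (fun q => q.1 == r*s+c)).map (·.2)) = [(r-1)*s+c] := by
  rw [pvFlatMapTwo 0 s c s _ hcs ?_]
  · rw [if_pos ⟨h0c, hcs⟩, if_neg (by omega), pvHotUp s r c hs h0r hrs h0c hcs]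
    simp
  · intro x hx0 hxs hxc _
    rw [pvStepFilterNil s r c (r-1) x (by omega) h0c hcs hx0 hxs
      (Or.inl (by omega)) (Or.inl (by omega)) (Or.inr hxc)]
    rfl

-- Row r contributes left, then right, then down.
lemma pvRowSelf (s r c : Int) (hs : 2 ≤ s) (_h0r : 0 ≤ r) (_hrs : r < s) (h0c : 0 ≤ c) (hcs : c < s) :
    (PySem.List.pyRange 0 s 1).flatMap
      (fun c' => ((pvStep s r c').filter (fun q => q.1 == r*s+c)).map (·.2)) =
      (if 0 < c then [r*s+(c-1)] else []) ++
        ((if c + 1 < s then [r*s+(c+1)] else []) ++ (if r + 1 < s then [(r+1)*s+c] else [])) := by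
  rw [pvFlatMapTwo 0 s (c-1) c _ (by omega) ?_]
  · by_cases h : 0 < c
    · rw [if_pos (show (0:Int) ≤ c - 1 ∧ c - 1 < s by omega),
        if_pos (show (0:Int) ≤ c ∧ c < s from ⟨h0c, hcs⟩),
        pvHotLeft s r c hs h hcs, pvHotSelf s r c hs h0c hcs, if_pos h]
    · rw [if_neg (show ¬((0:Int) ≤ c - 1 ∧ c - 1 < s) by omega),
        if_pos (show (0:Int) ≤ c ∧ c < s from ⟨h0c, hcs⟩),
        pvHotSelf s r c hs h0c hcs, if_neg h]
  · intro x hx0 hxs hne1 hne2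
    rw [pvStepFilterNil s r c r x (by omega) h0c hcs hx0 hxs
      (Or.inr hne2) (Or.inr (by omega)) (Or.inl (by omega))]
    rfl

-- The value A accumulates at node i equals B's neighbor list.
lemma pvPointwise (s i : Int) (hs : 2 ≤ s) (h0 : 0 ≤ i) (hi : i < s*s) :
    ((pvOps s).filter (fun p => p.1 == i)).map (·.2) =
      (if PySem.Int.floordiv i s > 0 then [i - s] else []) ++
        (if PySem.Int.mod i s > 0 then [i - 1] else []) ++
        (if PySem.Int.mod i s + 1 < s then [i + 1] else []) ++
        (if PySem.Int.floordiv i s + 1 < s then [i + s] else []) := by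
  have hs0 : (0:Int) < s := by omega
  set r := PySem.Int.floordiv i s with hr
  set c := PySem.Int.mod i s with hc
  have h0c : 0 ≤ c := PySem.Int.mod_nonneg i hs0
  have hcs : c < s := PySem.Int.mod_lt i hs0
  have hdec : r * s + c = i := PySem.Int.floordiv_mul_add_mod i s
  have h0r : 0 ≤ r := by
    rw [hr]
    have h' := (PySem.Int.le_floordiv_iff_mul_le (a := i) (b := s) (q := 0) hs0)
    exact h'.mpr (by linarith)
  have hrs : r < s := by
    rw [hr]
    exact (PySem.Int.floordiv_lt_iff_lt_mul (a := i) (b := s) (q := s) hs0).mpr hi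
  have hkey : (fun p : Int × Int => p.1 == i) = (fun p => p.1 == r*s+c) := by
    funext p; rw [hdec]
  rw [pvOps, List.filter_flatMap, List.map_flatMap, hkey]
  have hflt : ∀ x : Int, (List.filter (fun p => p.1 == r*s+c)
      ((PySem.List.pyRange 0 s 1).flatMap (fun c' => pvStep s x c'))).map (·.2) =
      (PySem.List.pyRange 0 s 1).flatMap
        (fun c' => ((pvStep s x c').filter (fun q => q.1 == r*s+c)).map (·.2)) := by
    intro x
    rw [List.filter_flatMap, List.map_flatMap]
  have hzrows : ∀ x, (0:Int) ≤ x → x < s → x ≠ r - 1 → x ≠ r →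
      (List.filter (fun p => p.1 == r*s+c)
        ((PySem.List.pyRange 0 s 1).flatMap (fun c' => pvStep s x c'))).map (·.2) = [] := by
    intro x hx0 hxs hx1 hx2
    rw [hflt x, pvRowZero s r c x hs h0c hcs hx1 hx2]
  rw [pvFlatMapTwo 0 s (r-1) r _ (by omega) hzrows]
  rw [if_pos (show (0:Int) ≤ r ∧ r < s from ⟨h0r, hrs⟩), hflt r,
    pvRowSelf s r c hs h0r hrs h0c hcs]
  have vleft : r*s+(c-1) = i - 1 := by rw [← hdec]; ring
  have vright : r*s+(c+1) = i + 1 := by rw [← hdec]; ring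
  have vdown : (r+1)*s+c = i + s := by rw [← hdec]; ring
  have vup : (r-1)*s+c = i - s := by rw [← hdec]; ring
  by_cases h : 0 < r
  · rw [if_pos (show (0:Int) ≤ r - 1 ∧ r - 1 < s by omega), hflt (r-1),
      pvRowUp s r c hs h hrs h0c hcs, if_pos h, vleft, vright, vdown, vup]
    simp [List.append_assoc]
  · rw [if_neg (by omega), if_neg h, vleft, vright, vdown]
    simp [List.append_assoc]

-- A's branch-bound: every key pvOps touches lies in [0, s*s).
lemma pvOps_key_mem (s : Int) (hs : 2 ≤ s) (p : Int × Int) (hp : p ∈ pvOps s) :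
    0 ≤ p.1 ∧ p.1 < s * s := by
  simp only [pvOps, List.mem_flatMap] at hp
  obtain ⟨r, hrm, c, hcm, hp⟩ := hp
  rw [PySem.List.mem_pyRange_one] at hrm hcm
  obtain ⟨h0r, hrs⟩ := hrm
  obtain ⟨h0c, hcs⟩ := hcm
  rcases pvStep_key_cases s r c p hp with h | ⟨hlt, h⟩ | ⟨hlt, h⟩ <;> rw [h] <;>
    constructor <;> nlinarith [mul_le_mul_of_nonneg_right (show r + 1 ≤ s by omega) (show (0:Int) ≤ s by omega)]

-- The initial dict: items, keys, nodup.
lemma pvInit_items (m : Int) :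
    ((PySem.List.pyRange 0 m 1).foldl (fun d i => d.insert i ([] : List Int))
      PySem.Dict.empty).items = (PySem.List.pyRange 0 m 1).map (fun i => (i, ([] : List Int))) := by
  have h := PySem.Dict.items_foldl_insert_fresh (PySem.List.pyRange 0 m 1)
    (fun a => a) (fun _ => ([] : List Int)) PySem.Dict.empty
    (fun a _ => by simp [PySem.Dict.contains_empty])
    (by simpa using PySem.List.nodup_pyRange_one 0 m)
  simpa using h

lemma pvInit_keys (m : Int) :
    ((PySem.List.pyRange 0 m 1).foldl (fun d i => d.insert i ([] : List Int))
      PySem.Dict.empty).keys = PySem.List.pyRange 0 m 1 := by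
  rw [show ∀ d : PySem.Dict Int (List Int), d.keys = d.items.map Prod.fst from fun _ => rfl,
    pvInit_items, List.map_map,
    show (Prod.fst ∘ fun i : Int => (i, ([] : List Int))) = id from rfl, List.map_id]

-- Final assembly, parametric in the (shared) side length.
lemma pvMain (s : Int) (hs : 2 ≤ s) :
    ((pvOps s).foldl (fun d p => d.modify p.1 [] (· ++ [p.2]))
      ((PySem.List.pyRange 0 (s*s) 1).foldl (fun d i => d.insert i ([] : List Int))
        PySem.Dict.empty)).items =
    ((PySem.List.pyRange 0 (s*s) 1).foldl (fun d idx =>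
      d.insert idx (
        (if PySem.Int.floordiv idx s > 0 then [idx - s] else []) ++
        (if PySem.Int.mod idx s > 0 then [idx - 1] else []) ++
        (if PySem.Int.mod idx s + 1 < s then [idx + 1] else []) ++
        (if PySem.Int.floordiv idx s + 1 < s then [idx + s] else [])))
      PySem.Dict.empty).items := by
  set d0 := (PySem.List.pyRange 0 (s*s) 1).foldl (fun d i => d.insert i ([] : List Int))
    PySem.Dict.empty with hd0
  have hkeys0 : d0.keys = PySem.List.pyRange 0 (s*s) 1 := pvInit_keys (s*s)
  have hnd0 : d0.keys.Nodup := by rw [hkeys0]; exact PySem.List.nodup_pyRange_one 0 (s*s)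
  -- A's side
  have hkeysA : ((pvOps s).foldl (fun d p => d.modify p.1 [] (· ++ [p.2])) d0).keys =
      PySem.List.pyRange 0 (s*s) 1 := by
    rw [PySem.Dict.keys_foldl_modify_key (pvOps s) Prod.fst [] (fun _ p => (· ++ [p.2])) d0]
    rw [hkeys0]
    apply pvSetUpdate_subset
    intro x hx
    simp only [List.mem_map] at hx
    obtain ⟨p, hp, hpx⟩ := hx
    have := pvOps_key_mem s hs p hp
    rw [PySem.List.mem_pyRange_one]
    omega
  have hndA : ((pvOps s).foldl (fun d p => d.modify p.1 [] (· ++ [p.2])) d0).keys.Nodup := by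
    exact PySem.Dict.nodup_keys_foldl_modify_key (pvOps s) Prod.fst [] (fun _ p => (· ++ [p.2])) d0 hnd0
  rw [PySem.Dict.items_eq_map_keys _ hndA ([] : List Int), hkeysA]
  -- B's side
  have hB := PySem.Dict.items_foldl_insert_fresh (PySem.List.pyRange 0 (s*s) 1)
    (fun a => a)
    (fun idx =>
      (if PySem.Int.floordiv idx s > 0 then [idx - s] else []) ++
      (if PySem.Int.mod idx s > 0 then [idx - 1] else []) ++
      (if PySem.Int.mod idx s + 1 < s then [idx + 1] else []) ++
      (if PySem.Int.floordiv idx s + 1 < s then [idx + s] else []))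
    PySem.Dict.empty
    (fun a _ => by simp [PySem.Dict.contains_empty])
    (by simpa using PySem.List.nodup_pyRange_one 0 (s*s))
  rw [show (PySem.Dict.empty : PySem.Dict Int (List Int)).items = [] from rfl,
    List.nil_append] at hB
  rw [hB]
  apply List.map_congr_left
  intro i hi
  rw [PySem.List.mem_pyRange_one] at hi
  have hval : ((pvOps s).foldl (fun d p => d.modify p.1 [] (· ++ [p.2])) d0).getD i [] =
      ((pvOps s).filter (fun p => p.1 == i)).map (·.2) := by
    rw [PySem.Dict.getD_foldl_modify_append, hd0,
      pvGetD_init _ _ _ (by simp [PySem.Dict.getD_empty])]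
    rfl
  rw [hval, pvPointwise s i hs hi.1 hi.2]

-- ===== VERDICT (by name: the statement is the Claim_ definition above) =====
theorem build_grid2d_py_spec : Claim_equal_build_grid2d_py := by
  intro n _ _
  unfold Spec_build_grid2d_py build_grid2d_py build_grid2d_py_alt
  have hs : (2:Int) ≤ max 2 (pvISqrt n) := le_max_left _ _
  have h1 := pvLoop_eq_foldl_ops (max 2 (pvISqrt n))
    ((PySem.List.pyRange 0 ((max 2 (pvISqrt n)) * (max 2 (pvISqrt n))) 1).foldl
      (fun d i => d.insert i ([] : List Int)) PySem.Dict.empty)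
  have h2 := pvMain (max 2 (pvISqrt n)) hs
  exact Prod.ext rfl ((congrArg PySem.Dict.items h1).trans h2)
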